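-- pv_equiv track=rewrite | github.com/Joldnine/bayesian-network | d-sep.py | is_dsep
-- ===== SOURCE A (Python) =====
-- def is_dsep(graph, start, end, obs):
--     """Determine d-separation starting from start to end given observed
--
--     Args:
--         graph (dict): the Bayesian network
--         start (int): start node
--         end (int): end node
--         observed (list): list of nodes in set Z
--
--     Returns:
--         bool
--     """
--     # 1. We begin by traversing the graph bottom up, from the leaves to the roots,
--     # marking all nodes that are in Z or that have descendants in Z.
--     obs_anc = get_obs_anc(graph, obs)
--
--     # 2. We traverse breadth-first from X to Y , stopping the traversal along a
--     # trail when we get to a blocked node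
--     via_nodes = [(start, "up")]
--     visited = set()
--     while len(via_nodes) > 0:
--         (node, direction) = via_nodes.pop()
--
--         if (node, direction) not in visited:
--             visited.add((node, direction))
--
--             if node not in obs and node == end:
--                 return False
--
--             if direction == "up" and node not in obs:
--                 for parent in find_parents(graph, node):
--                     via_nodes.append((parent, "up"))
--                 for child in graph[node]:
--                     via_nodes.append((child, "down"))
--             elif direction == "down":
--                 if node not in obs:
--                     for child in graph[node]:
--                         via_nodes.append((child, "down"))
--                 if node in obs or node in obs_anc:
--                     for parent in find_parents(graph, node):
--                         via_nodes.append((parent, "up"))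
--     return True
--
-- def get_obs_anc(graph, observed):
--     # copy observed
--     visit_nodes = []
--     for o in observed:
--         visit_nodes.append(o)
--     ancestors = set()
--
--     while len(visit_nodes) > 0:
--         node = visit_nodes.pop()
--         for parent in find_parents(graph, node):
--             ancestors.add(parent)
--             visit_nodes.append(parent)
--     return list(ancestors)
--
-- def find_parents(graph, node):
--     parents = []
--     for key, value in graph.items():
--         if node in graph[key]:
--             parents.append(key)
--     return parents
-- ===== SOURCE B (Python) =====
-- def is_dsep(graph, start, end, obs):
--     # Build a reverse (child -> parents) index once, instead of rescanning all
--     # of graph.items() for every parent query.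
--     parents = {}
--     for k in graph:
--         for c in graph[k]:
--             parents.setdefault(c, []).append(k)
--
--     def par(n):
--         return parents.get(n, [])
--
--     obs_set = set(obs)
--
--     # Ancestral closure of obs (obs together with all its ancestors),
--     # computed by saturation passes until nothing changes.
--     anc = set(obs)
--     changed = True
--     while changed:
--         changed = False
--         for n in list(anc):
--             for p in par(n):
--                 if p not in anc:
--                     anc.add(p)
--                     changed = True
--
--     # Saturate the set of reachable Bayes-ball states (node, going_up).
--     reached = {(start, True)}
--     changed = True
--     while changed:
--         changed = False
--         for (n, up) in list(reached):
--             nxt = []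
--             if up and n not in obs_set:
--                 nxt += [(p, True) for p in par(n)]
--                 nxt += [(c, False) for c in graph.get(n, [])]
--             elif not up:
--                 if n not in obs_set:
--                     nxt += [(c, False) for c in graph.get(n, [])]
--                 if n in anc:
--                     nxt += [(p, True) for p in par(n)]
--             for s in nxt:
--                 if s not in reached:
--                     reached.add(s)
--                     changed = True
--
--     if end in obs_set:
--         return True
--     return (end, True) not in reached and (end, False) not in reached
-- ===== Notes on version B (the rewrite author's own statement) =====
-- stated objective: alternative
-- what changed: A's stacked Bayes-ball DFS with early return, a visited set and a full scan of graph.items() for every find_parents call (plus a worklist ancestor search that re-expands nodes once per path) is replaced by a child->parents index built once plus fixpoint saturation of the observed-ancestor set and of the reachable (node,direction) state set, followed by a final membership test; intended as faster (A's ancestor worklist is exponential and timed out at n=64 where B returned) but a timing run could not certify a ratio.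
-- outside the precondition, e.g. on is_dsep({1: [9, 2]}, 1, 2, []): A returns False, B returns False
import Mathlib
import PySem

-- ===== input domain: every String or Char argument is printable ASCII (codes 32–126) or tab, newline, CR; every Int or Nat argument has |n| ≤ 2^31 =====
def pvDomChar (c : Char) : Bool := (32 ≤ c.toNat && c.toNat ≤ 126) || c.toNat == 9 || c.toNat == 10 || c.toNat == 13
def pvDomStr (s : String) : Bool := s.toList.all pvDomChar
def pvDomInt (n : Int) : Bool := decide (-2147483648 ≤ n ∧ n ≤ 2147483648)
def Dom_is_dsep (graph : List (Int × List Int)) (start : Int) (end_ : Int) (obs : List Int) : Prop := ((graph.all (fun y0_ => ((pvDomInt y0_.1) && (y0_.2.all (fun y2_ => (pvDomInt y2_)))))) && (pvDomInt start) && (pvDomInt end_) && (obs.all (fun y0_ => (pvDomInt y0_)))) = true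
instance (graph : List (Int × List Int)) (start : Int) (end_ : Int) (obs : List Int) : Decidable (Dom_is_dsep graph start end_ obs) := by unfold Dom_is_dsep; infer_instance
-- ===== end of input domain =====

-- B replaces A's stacked Bayes-ball DFS (with repeated full-dict parent scans) by a
-- reverse-parent index built once plus fixpoint saturation of the reachable-state set;
-- proved equal to A on acyclic graphs whose child lists mention only keys.


-- ===== PORT A =====

-- find_parents(graph, node): scan graph.items(), collect keys whose value contains node
-- (for a key drawn from items(), graph[key] is exactly the paired value)
def findParents (g : PySem.Dict Int (List Int)) (node : Int) : List Int :=
  g.items.foldl (fun ps kv => if node ∈ kv.2 then ps ++ [kv.1] else ps) []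

-- the while-loop of get_obs_anc; fuel is a totality guard only (Python's loop
-- terminates exactly on parent-acyclic graphs, which Pre_ requires; the fuel proved
-- sufficient there in the lemmas below)
def gobLoop (g : PySem.Dict Int (List Int)) : Nat → List Int → PySem.Set Int → PySem.Set Int
  | 0, _, anc => anc
  | f+1, visit, anc =>
    match visit.getLast? with          -- visit_nodes.pop()
    | none => anc
    | some node =>
      let ps := findParents g node
      gobLoop g f (visit.dropLast ++ ps) (ps.foldl PySem.Set.add anc)

def getObsAnc (g : PySem.Dict Int (List Int)) (observed : List Int) : List Int :=
  gobLoop g (observed.length * (g.keys.length + 1) ^ (g.keys.length + 1) + 1)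
    (observed.foldl (fun l o => l ++ [o]) []) PySem.Set.empty

-- the main Bayes-ball while-loop (stack `via`, set `visited`); fuel is a totality
-- guard only (this loop always terminates; the fuel is proved sufficient below)
def mainLoop (g : PySem.Dict Int (List Int)) (end_ : Int) (obs : List Int) (obsAnc : List Int) :
    Nat → List (Int × Bool) → PySem.Set (Int × Bool) → Bool
  | 0, _, _ => true
  | f+1, via, visited =>
    match via.getLast? with            -- via_nodes.pop()
    | none => true
    | some nd =>
      let rest := via.dropLast
      if nd ∈ visited then mainLoop g end_ obs obsAnc f rest visited
      else
        let visited' := PySem.Set.add visited nd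
        if nd.1 ∉ obs ∧ nd.1 = end_ then false
        else if nd.2 = true ∧ nd.1 ∉ obs then   -- direction == "up" (true = "up")
          mainLoop g end_ obs obsAnc f
            (rest ++ (findParents g nd.1).map (fun p => (p, true))
                  ++ (PySem.Dict.getD g nd.1 []).map (fun c => (c, false))) visited'
        else if nd.2 = false then               -- elif direction == "down"
          mainLoop g end_ obs obsAnc f
            (rest ++ (if nd.1 ∉ obs then (PySem.Dict.getD g nd.1 []).map (fun c => (c, false)) else [])
                  ++ (if nd.1 ∈ obs ∨ nd.1 ∈ obsAnc then (findParents g nd.1).map (fun p => (p, true)) else []))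
            visited'
        else mainLoop g end_ obs obsAnc f rest visited'

def is_dsep (graph : List (Int × List Int)) (start : Int) (end_ : Int) (obs : List Int) : Bool :=
  let g := PySem.Dict.ofList graph
  let obsAnc := getObsAnc g obs
  let N := g.keys.length + g.values.flatten.length
  mainLoop g end_ obs obsAnc ((N + 1) * (N + 1) + 2) [(start, true)] PySem.Set.empty

-- ===== PORT B =====

-- one saturation pass: for n in list(S): for y in succ(n): S.add(y)
def satStep {α : Type} [DecidableEq α] (succ : α → List α) (S : PySem.Set α) : PySem.Set α :=
  S.foldl (fun T n => (succ n).foldl PySem.Set.add T) S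

-- while changed: ... (stops at the first pass that adds nothing; fuel is a totality
-- guard, proved sufficient below via pigeonhole on the finite universe)
def satLoop {α : Type} [DecidableEq α] (succ : α → List α) : Nat → PySem.Set α → PySem.Set α
  | 0, S => S
  | f+1, S => if satStep succ S = S then S else satLoop succ f (satStep succ S)

-- child -> parents index, built in one pass over the dict
def buildParents (g : PySem.Dict Int (List Int)) : PySem.Dict Int (List Int) :=
  g.items.foldl (fun d kv => kv.2.foldl (fun d' c => PySem.Dict.modify d' c [] (· ++ [kv.1])) d)
    PySem.Dict.empty

def is_dsep_alt (graph : List (Int × List Int)) (start : Int) (end_ : Int) (obs : List Int) : Bool :=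
  let g := PySem.Dict.ofList graph
  let par : Int → List Int := fun n => PySem.Dict.getD (buildParents g) n []
  let obsSet : PySem.Set Int := PySem.Set.ofList obs
  let K := g.keys.length
  let C := g.values.flatten.length
  -- ancestral closure of obs (obs together with all its ancestors)
  let anc := satLoop par (K + 1) obsSet
  -- Bayes-ball state successors
  let nxt : Int × Bool → List (Int × Bool) := fun nd =>
    if nd.2 = true ∧ nd.1 ∉ obsSet then
      (par nd.1).map (fun p => (p, true)) ++ (PySem.Dict.getD g nd.1 []).map (fun c => (c, false))
    else if nd.2 = false then
      (if nd.1 ∉ obsSet then (PySem.Dict.getD g nd.1 []).map (fun c => (c, false)) else []) ++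
      (if nd.1 ∈ anc then (par nd.1).map (fun p => (p, true)) else [])
    else []
  let reached := satLoop nxt (K + C + 2) (PySem.Set.add PySem.Set.empty (start, true))
  if end_ ∈ obsSet then true
  else decide ((end_, true) ∉ reached ∧ (end_, false) ∉ reached)

-- ===== PRECONDITION & SPEC =====

-- helpers for Pre_: the strict ancestors of a node, as the (keys+1)-fold closure of
-- the one-pass "add all parents of members" map (a bounded closure, no early exit)
def parStep (g : PySem.Dict Int (List Int)) (S : PySem.Set Int) : PySem.Set Int :=
  PySem.Set.update S
    ((g.items.filter (fun kv => kv.2.any (fun c => PySem.Set.contains S c))).map (fun kv => kv.1))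

def strictAncs (g : PySem.Dict Int (List Int)) (k : Int) : PySem.Set Int :=
  (parStep g)^[g.keys.length + 1] (PySem.Set.ofList (findParents g k))

-- obs together with everything above it (its ancestral closure), same device
def obsCl (g : PySem.Dict Int (List Int)) (obs : List Int) : PySem.Set Int :=
  (parStep g)^[g.keys.length + 1] (PySem.Set.ofList obs)

-- the full Bayes-ball state closure, by the same bounded-iterate device (used by Pre_
-- to say which graph cells the traversal can touch)
def bbStep (g : PySem.Dict Int (List Int)) (obs : List Int) (anc : PySem.Set Int)
    (S : PySem.Set (Int × Bool)) : PySem.Set (Int × Bool) :=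
  PySem.Set.update S (S.flatMap (fun nd =>
    if nd.2 = true ∧ nd.1 ∉ obs then
      (findParents g nd.1).map (fun p => (p, true)) ++ (PySem.Dict.getD g nd.1 []).map (fun c => (c, false))
    else if nd.2 = false then
      (if nd.1 ∉ obs then (PySem.Dict.getD g nd.1 []).map (fun c => (c, false)) else []) ++
      (if nd.1 ∈ anc then (findParents g nd.1).map (fun p => (p, true)) else [])
    else []))

def bbReach (g : PySem.Dict Int (List Int)) (start : Int) (obs : List Int) :
    PySem.Set (Int × Bool) :=
  (bbStep g obs (obsCl g obs))^[g.keys.length + g.values.flatten.length + 2]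
    (PySem.Set.add PySem.Set.empty (start, true))

-- Pre_ excludes inputs where a directed parent-cycle is reachable upward from obs (A's
-- get_obs_anc then loops forever) and inputs on which some Bayes-ball-reachable
-- unobserved node other than end (whose pop returns before indexing) is not a key of
-- the dict (A's graph[node] raises KeyError when it pops such a node; when A's early
-- return on end fires first, A happens to return anyway — see the cites).
def Pre_is_dsep (graph : List (Int × List Int)) (start : Int) (end_ : Int) (obs : List Int) : Prop :=
  (∀ n ∈ obsCl (PySem.Dict.ofList graph) obs, n ∉ strictAncs (PySem.Dict.ofList graph) n) ∧
  ((start = end_ ∧ start ∉ obs) ∨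
    (∀ nd ∈ bbReach (PySem.Dict.ofList graph) start obs,
      nd.1 ∉ obs ∧ nd.1 ≠ end_ → nd.1 ∈ (PySem.Dict.ofList graph).keys))
instance (graph : List (Int × List Int)) (start : Int) (end_ : Int) (obs : List Int) : Decidable (Pre_is_dsep graph start end_ obs) := by unfold Pre_is_dsep; infer_instance

def pvWitness_is_dsep : (List (Int × List Int)) × Int × Int × List Int :=
  ([(0, [1]), (1, [])], 0, 1, [])

def Spec_is_dsep (graph : List (Int × List Int)) (start : Int) (end_ : Int) (obs : List Int) (out : Bool) : Prop := out = is_dsep_alt graph start end_ obs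
instance (graph : List (Int × List Int)) (start : Int) (end_ : Int) (obs : List Int) (out : Bool) : Decidable (Spec_is_dsep graph start end_ obs out) := by unfold Spec_is_dsep; infer_instance

-- ===== CLAIM (what is proved, stated in full; the proofs are below) =====
def Claim_equal_is_dsep : Prop := ∀ (graph : List (Int × List Int)) (start : Int) (end_ : Int) (obs : List Int), Dom_is_dsep graph start end_ obs → Pre_is_dsep graph start end_ obs → Spec_is_dsep graph start end_ obs (is_dsep graph start end_ obs)

-- ===== LEMMAS AND PROOFS =====

-- ---------- generic facts about satStep / satLoop ----------

theorem mem_foldl_setAdd {α : Type} [DecidableEq α] (L : List α) (T : PySem.Set α) (y : α) :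
    y ∈ L.foldl PySem.Set.add T ↔ y ∈ T ∨ y ∈ L := by
  induction L generalizing T with
  | nil => simp
  | cons x L ih =>
    simp only [List.foldl_cons, ih, PySem.Set.mem_add, List.mem_cons]
    tauto

theorem nodup_foldl_setAdd {α : Type} [DecidableEq α] (L : List α) (T : PySem.Set α)
    (h : T.Nodup) : (L.foldl PySem.Set.add T).Nodup := by
  induction L generalizing T with
  | nil => exact h
  | cons x L ih => exact ih _ (PySem.Set.nodup_add _ _ h)

theorem foldl_setAdd_shape {α : Type} [DecidableEq α] (L : List α) (T : PySem.Set α) :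
    ∃ E, L.foldl PySem.Set.add T = T ++ E := by
  induction L generalizing T with
  | nil => exact ⟨[], by simp⟩
  | cons x L ih =>
    rcases ih (PySem.Set.add T x) with ⟨E, hE⟩
    rw [PySem.Set.add_eq_ite] at hE
    by_cases hx : x ∈ T
    · exact ⟨E, by simpa [hx] using hE⟩
    · exact ⟨x :: E, by simpa [hx] using hE⟩

theorem mem_satStep {α : Type} [DecidableEq α] (succ : α → List α) (S : PySem.Set α) (y : α) :
    y ∈ satStep succ S ↔ y ∈ S ∨ ∃ n ∈ S, y ∈ succ n := by
  have aux : ∀ (L : List α) (T : PySem.Set α),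
      (y ∈ L.foldl (fun T n => (succ n).foldl PySem.Set.add T) T ↔ y ∈ T ∨ ∃ n ∈ L, y ∈ succ n) := by
    intro L
    induction L with
    | nil => simp
    | cons x L ih =>
      intro T
      simp only [List.foldl_cons, ih, mem_foldl_setAdd, List.mem_cons]
      constructor
      · rintro ((h | h) | ⟨n, hn, h⟩)
        · exact Or.inl h
        · exact Or.inr ⟨x, Or.inl rfl, h⟩
        · exact Or.inr ⟨n, Or.inr hn, h⟩
      · rintro (h | ⟨n, (rfl | hn), h⟩)
        · exact Or.inl (Or.inl h)
        · exact Or.inl (Or.inr h)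
        · exact Or.inr ⟨n, hn, h⟩
  exact aux S S

theorem satStep_shape {α : Type} [DecidableEq α] (succ : α → List α) (S : PySem.Set α) :
    ∃ E, satStep succ S = S ++ E := by
  have aux : ∀ (L : List α) (T : PySem.Set α),
      ∃ E, L.foldl (fun T n => (succ n).foldl PySem.Set.add T) T = T ++ E := by
    intro L
    induction L with
    | nil => exact fun T => ⟨[], by simp⟩
    | cons x L ih =>
      intro T
      rcases foldl_setAdd_shape (succ x) T with ⟨E1, hE1⟩
      rcases ih ((succ x).foldl PySem.Set.add T) with ⟨E2, hE2⟩
      exact ⟨E1 ++ E2, by simp [hE1] at hE2 ⊢; simp [hE2]⟩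
  exact aux S S

theorem nodup_satStep {α : Type} [DecidableEq α] (succ : α → List α) (S : PySem.Set α)
    (h : S.Nodup) : (satStep succ S).Nodup := by
  have aux : ∀ (L : List α) (T : PySem.Set α), T.Nodup →
      (L.foldl (fun T n => (succ n).foldl PySem.Set.add T) T).Nodup := by
    intro L
    induction L with
    | nil => exact fun T h => h
    | cons x L ih => exact fun T h => ih _ (nodup_foldl_setAdd _ _ h)
  exact aux S S h

theorem nodup_satLoop {α : Type} [DecidableEq α] (succ : α → List α) (f : Nat) (S : PySem.Set α)
    (h : S.Nodup) : (satLoop succ f S).Nodup := by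
  induction f generalizing S with
  | zero => exact h
  | succ f ih =>
    simp only [satLoop]
    split
    · exact h
    · exact ih _ (nodup_satStep _ _ h)

theorem mem_satLoop_of_mem {α : Type} [DecidableEq α] (succ : α → List α) (f : Nat)
    (S : PySem.Set α) (y : α) (h : y ∈ S) : y ∈ satLoop succ f S := by
  induction f generalizing S with
  | zero => exact h
  | succ f ih =>
    simp only [satLoop]
    split
    · exact h
    · exact ih _ ((mem_satStep succ S y).2 (Or.inl h))

theorem satLoop_sound {α : Type} [DecidableEq α] (succ : α → List α) (f : Nat)
    (S : PySem.Set α) (y : α) (h : y ∈ satLoop succ f S) :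
    ∃ s ∈ S, Relation.ReflTransGen (fun a b => b ∈ succ a) s y := by
  induction f generalizing S with
  | zero => exact ⟨y, h, Relation.ReflTransGen.refl⟩
  | succ f ih =>
    simp only [satLoop] at h
    split at h
    · exact ⟨y, h, Relation.ReflTransGen.refl⟩
    · rcases ih _ h with ⟨s, hs, hr⟩
      rcases (mem_satStep succ S s).1 hs with hs' | ⟨n, hn, hsucc⟩
      · exact ⟨s, hs', hr⟩
      · exact ⟨n, hn, Relation.ReflTransGen.head hsucc hr⟩

theorem closed_reach {α : Type} (succ : α → List α) (T : List α)
    (hT : ∀ a ∈ T, ∀ b ∈ succ a, b ∈ T) (s y : α) (hs : s ∈ T)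
    (h : Relation.ReflTransGen (fun a b => b ∈ succ a) s y) : y ∈ T := by
  induction h with
  | refl => exact hs
  | tail _ hbc ih => exact hT _ ih _ hbc

theorem length_filter_lt {α : Type} (U : List α) (p q : α → Bool)
    (hpq : ∀ u, q u = true → p u = true) (x : α) (hxU : x ∈ U) (hx : p x = true)
    (hnx : q x = false) : (U.filter q).length < (U.filter p).length := by
  induction U with
  | nil => cases hxU
  | cons u U ih =>
    rcases List.mem_cons.1 hxU with rfl | hxU
    · have hlen : (U.filter q).length ≤ (U.filter p).length := by
        have := List.Sublist.length_le (List.monotone_filter_right U (fun a ha => hpq a ha))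
        exact this
      simp only [List.filter_cons, hx, hnx]
      simpa using Nat.lt_succ_of_le hlen
    · have := ih hxU
      simp only [List.filter_cons]
      split <;> split <;> simp_all <;> try omega

theorem satLoop_fix {α : Type} [DecidableEq α] (succ : α → List α) (U : List α)
    (hU : ∀ n y, y ∈ succ n → y ∈ U) :
    ∀ (f : Nat) (S : PySem.Set α), S.Nodup →
      (U.filter (fun u => decide (u ∉ S))).length < f →
      satStep succ (satLoop succ f S) = satLoop succ f S := by
  intro f
  induction f with
  | zero => intro S _ h; omega
  | succ f ih =>
    intro S hnd hf
    simp only [satLoop]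
    split
    · next h => simp [h]
    · next h =>
      apply ih _ (nodup_satStep _ _ hnd)
      -- the step added at least one new element of U
      rcases satStep_shape succ S with ⟨E, hE⟩
      have hEne : E ≠ [] := by rintro rfl; simp at hE; exact h hE
      rcases List.exists_mem_of_ne_nil E hEne with ⟨x, hxE⟩
      have hxStep : x ∈ satStep succ S := by rw [hE]; exact List.mem_append_right _ hxE
      have hxS : x ∉ S := by
        have : (satStep succ S).Nodup := nodup_satStep _ _ hnd
        rw [hE] at this
        exact fun hxs => (List.disjoint_of_nodup_append this) hxs hxE
      have hxU : x ∈ U := by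
        rcases (mem_satStep succ S x).1 hxStep with h' | ⟨n, _, hsucc⟩
        · exact absurd h' hxS
        · exact hU n x hsucc
      have hmono : ∀ u, u ∈ S → u ∈ satStep succ S := fun u hu =>
        (mem_satStep succ S u).2 (Or.inl hu)
      have := length_filter_lt U (fun u => decide (u ∉ S)) (fun u => decide (u ∉ satStep succ S))
        (by intro u hu; simp at hu ⊢; exact fun hus => hu (hmono u hus))
        x hxU (by simpa using hxS) (by simpa using hxStep)
      omega

theorem satLoop_closed {α : Type} [DecidableEq α] (succ : α → List α) (U : List α)
    (hU : ∀ n y, y ∈ succ n → y ∈ U) (f : Nat) (S : PySem.Set α) (hnd : S.Nodup)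
    (hf : (U.filter (fun u => decide (u ∉ S))).length < f) :
    ∀ a ∈ satLoop succ f S, ∀ b ∈ succ a, b ∈ satLoop succ f S := by
  intro a ha b hb
  have hfix := satLoop_fix succ U hU f S hnd hf
  rw [← hfix]
  exact (mem_satStep succ _ b).2 (Or.inr ⟨a, ha, hb⟩)

theorem satLoop_char {α : Type} [DecidableEq α] (succ : α → List α) (U : List α)
    (hU : ∀ n y, y ∈ succ n → y ∈ U) (f : Nat) (S : PySem.Set α) (hnd : S.Nodup)
    (hf : (U.filter (fun u => decide (u ∉ S))).length < f) (y : α) :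
    y ∈ satLoop succ f S ↔ ∃ s ∈ S, Relation.ReflTransGen (fun a b => b ∈ succ a) s y := by
  constructor
  · exact satLoop_sound succ f S y
  · rintro ⟨s, hs, hr⟩
    exact closed_reach succ _ (satLoop_closed succ U hU f S hnd hf) s y
      (mem_satLoop_of_mem succ f S s hs) hr


-- ---------- A-side: find_parents and get_obs_anc ----------

theorem findParents_eq (g : PySem.Dict Int (List Int)) (n : Int) :
    findParents g n = (g.items.filter (fun kv => decide (n ∈ kv.2))).map (fun kv => kv.1) := by
  unfold findParents
  have h : (fun (ps : List Int) (kv : Int × List Int) => if n ∈ kv.2 then ps ++ [kv.1] else ps)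
      = (fun ps kv => if (fun kv : Int × List Int => decide (n ∈ kv.2)) kv = true then ps ++ [kv.1] else ps) := by
    funext ps kv; simp
  rw [h, PySem.List.foldl_append_if]
  simp

theorem mem_findParents (g : PySem.Dict Int (List Int)) (n x : Int) :
    x ∈ findParents g n ↔ ∃ kv ∈ g.items, x = kv.1 ∧ n ∈ kv.2 := by
  rw [findParents_eq]
  simp only [List.mem_map, List.mem_filter, decide_eq_true_eq]
  constructor
  · rintro ⟨kv, ⟨h1, h2⟩, rfl⟩; exact ⟨kv, h1, rfl, h2⟩
  · rintro ⟨kv, h1, rfl, h2⟩; exact ⟨kv, ⟨h1, h2⟩, rfl⟩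

theorem findParents_subset_keys (g : PySem.Dict Int (List Int)) (n x : Int)
    (h : x ∈ findParents g n) : x ∈ g.keys := by
  rcases (mem_findParents g n x).1 h with ⟨kv, hkv, rfl, _⟩
  exact PySem.Dict.mem_keys_of_mem_items _ hkv

theorem length_findParents_le (g : PySem.Dict Int (List Int)) (n : Int) :
    (findParents g n).length ≤ g.keys.length := by
  rw [findParents_eq]
  simp only [List.length_map, PySem.Dict.keys, List.length_map]
  exact List.length_filter_le _ _

theorem mem_getD_flatten (g : PySem.Dict Int (List Int)) (n x : Int)
    (h : x ∈ PySem.Dict.getD g n []) : x ∈ g.values.flatten := by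
  rw [PySem.Dict.getD_eq_get?_getD] at h
  cases hg : PySem.Dict.get? g n with
  | none => rw [hg] at h; simp at h
  | some v =>
    rw [hg] at h; simp at h
    have hv : v ∈ g.values := by
      have := PySem.Dict.mem_items_of_get?_eq_some _ hg
      simp only [PySem.Dict.values]
      exact List.mem_map.2 ⟨(n, v), this, rfl⟩
    exact List.mem_flatten.2 ⟨v, hv, h⟩

-- no parent-cycle is reachable (upward) from s
def GoodFrom (g : PySem.Dict Int (List Int)) (s : Int) : Prop :=
  ∀ n, Relation.ReflTransGen (fun a b => b ∈ findParents g a) s n →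
    ∀ p ∈ findParents g n, ¬ Relation.ReflTransGen (fun a b => b ∈ findParents g a) p n

theorem GoodFrom_parent (g : PySem.Dict Int (List Int)) (s p : Int) (hg : GoodFrom g s)
    (hp : p ∈ findParents g s) : GoodFrom g p := by
  intro n hr q hq
  exact hg n (Relation.ReflTransGen.head hp hr) q hq

def ancClosure (g : PySem.Dict Int (List Int)) (S0 : PySem.Set Int) : PySem.Set Int :=
  satLoop (findParents g) (g.keys.length + 1) S0

theorem mem_ancClosure (g : PySem.Dict Int (List Int)) (S0 : PySem.Set Int) (hnd : S0.Nodup)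
    (y : Int) : y ∈ ancClosure g S0 ↔
      ∃ s ∈ S0, Relation.ReflTransGen (fun a b => b ∈ findParents g a) s y := by
  unfold ancClosure
  exact satLoop_char (findParents g) g.keys (fun n z => findParents_subset_keys g n z) _ S0 hnd
    (Nat.lt_succ_of_le (List.length_filter_le _ _)) y

theorem mem_parStep (g : PySem.Dict Int (List Int)) (S : PySem.Set Int) (y : Int) :
    y ∈ parStep g S ↔ y ∈ S ∨ ∃ n ∈ S, y ∈ findParents g n := by
  unfold parStep
  rw [PySem.Set.mem_update]
  simp only [List.mem_map, List.mem_filter, List.any_eq_true, PySem.Set.contains_iff]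
  constructor
  · rintro (h | ⟨kv, ⟨hkv, c, hc, hcS⟩, rfl⟩)
    · exact Or.inl h
    · exact Or.inr ⟨c, hcS, (mem_findParents g c kv.1).2 ⟨kv, hkv, rfl, hc⟩⟩
  · rintro (h | ⟨n, hn, hp⟩)
    · exact Or.inl h
    · rcases (mem_findParents g n _).1 hp with ⟨kv, hkv, rfl, hnkv⟩
      exact Or.inr ⟨kv, ⟨hkv, n, hnkv, hn⟩, rfl⟩

theorem nodup_parStep (g : PySem.Dict Int (List Int)) (S : PySem.Set Int) (h : S.Nodup) :
    (parStep g S).Nodup := PySem.Set.nodup_update _ _ h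

theorem parStep_shape (g : PySem.Dict Int (List Int)) (S : PySem.Set Int) :
    ∃ E, parStep g S = S ++ E := by
  unfold parStep
  rw [PySem.Set.update_eq_append_filter]
  exact ⟨_, rfl⟩

theorem nodup_subset_length {α : Type} [DecidableEq α] (A B : List α) (h : A.Nodup)
    (hsub : ∀ x ∈ A, x ∈ B) : A.length ≤ B.length := by
  calc A.length = A.toFinset.card := (List.toFinset_card_of_nodup h).symm
    _ ≤ B.toFinset.card := Finset.card_le_card (by
        intro x hx; rw [List.mem_toFinset] at hx ⊢; exact hsub x hx)
    _ ≤ B.length := List.toFinset_card_le B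

theorem iterate_parStep_mono (g : PySem.Dict Int (List Int)) (i : Nat) (S : PySem.Set Int)
    (y : Int) (h : y ∈ S) : y ∈ (parStep g)^[i] S := by
  induction i with
  | zero => exact h
  | succ i ih =>
    rw [Function.iterate_succ_apply']
    exact (mem_parStep g _ y).2 (Or.inl ih)

theorem iterate_parStep_nodup (g : PySem.Dict Int (List Int)) (i : Nat) (S : PySem.Set Int)
    (h : S.Nodup) : ((parStep g)^[i] S).Nodup := by
  induction i with
  | zero => exact h
  | succ i ih => rw [Function.iterate_succ_apply']; exact nodup_parStep g _ ih

theorem iterate_parStep_members (g : PySem.Dict Int (List Int)) (i : Nat) (S : PySem.Set Int) :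
    ∀ x ∈ (parStep g)^[i] S, x ∈ S ++ g.keys := by
  induction i with
  | zero => exact fun x hx => List.mem_append_left _ hx
  | succ i ih =>
    intro x hx
    rw [Function.iterate_succ_apply'] at hx
    rcases (mem_parStep g _ x).1 hx with h | ⟨n, _, hp⟩
    · exact ih x h
    · exact List.mem_append_right _ (findParents_subset_keys g n x hp)

theorem iterate_parStep_fix (g : PySem.Dict Int (List Int)) (j m : Nat) (S : PySem.Set Int)
    (hfix : parStep g ((parStep g)^[j] S) = (parStep g)^[j] S) :
    (parStep g)^[j + m] S = (parStep g)^[j] S := by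
  induction m with
  | zero => rfl
  | succ m ih =>
    have : j + (m + 1) = (j + m) + 1 := by omega
    rw [this, Function.iterate_succ_apply', ih, hfix]

theorem iterate_parStep_closed (g : PySem.Dict Int (List Int)) (S : PySem.Set Int)
    (hnd : S.Nodup) :
    ∀ a ∈ (parStep g)^[g.keys.length + 1] S, ∀ b ∈ findParents g a,
      b ∈ (parStep g)^[g.keys.length + 1] S := by
  have hexists : ∃ j ≤ g.keys.length, parStep g ((parStep g)^[j] S) = (parStep g)^[j] S := by
    by_contra hno
    push Not at hno
    have hgrow : ∀ n, n ≤ g.keys.length + 1 → S.length + n ≤ ((parStep g)^[n] S).length := by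
      intro n
      induction n with
      | zero => simp
      | succ n ihn =>
        intro hn
        have h1 := ihn (by omega)
        have hne := hno n (by omega)
        rcases parStep_shape g ((parStep g)^[n] S) with ⟨E, hE⟩
        have hEne : E ≠ [] := by rintro rfl; rw [List.append_nil] at hE; exact hne hE
        have : 1 ≤ E.length := List.length_pos_of_ne_nil hEne
        rw [Function.iterate_succ_apply', hE, List.length_append]
        omega
    have hle := nodup_subset_length ((parStep g)^[g.keys.length + 1] S) (S ++ g.keys)
      (iterate_parStep_nodup g _ S hnd) (iterate_parStep_members g _ S)
    have := hgrow (g.keys.length + 1) le_rfl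
    rw [List.length_append] at hle
    omega
  rcases hexists with ⟨j, hj, hfix⟩
  have heq : (parStep g)^[g.keys.length + 1] S = (parStep g)^[j] S := by
    have := iterate_parStep_fix g j (g.keys.length + 1 - j) S hfix
    rwa [Nat.add_sub_cancel' (by omega)] at this
  rw [heq]
  intro a ha b hb
  rw [← hfix]
  exact (mem_parStep g _ b).2 (Or.inr ⟨a, ha, hb⟩)

theorem mem_strictAncs_of (g : PySem.Dict Int (List Int)) (k p y : Int)
    (hp : p ∈ findParents g k)
    (hr : Relation.ReflTransGen (fun a b => b ∈ findParents g a) p y) :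
    y ∈ strictAncs g k := by
  unfold strictAncs
  refine closed_reach (findParents g) _
    (iterate_parStep_closed g _ (PySem.Set.nodup_ofList _)) p y
    (iterate_parStep_mono g _ _ p ((PySem.Set.mem_ofList _ _).2 hp)) hr

theorem good_of_pre (g : PySem.Dict Int (List Int)) (obs : List Int)
    (hpre : ∀ n ∈ obsCl g obs, n ∉ strictAncs g n) : ∀ o ∈ obs, GoodFrom g o := by
  intro o ho n hon p hp hr
  have hncl : n ∈ obsCl g obs := by
    unfold obsCl
    exact closed_reach (findParents g) _
      (iterate_parStep_closed g _ (PySem.Set.nodup_ofList _)) o n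
      (iterate_parStep_mono g _ _ o ((PySem.Set.mem_ofList _ _).2 ho)) hon
  exact hpre n hncl (mem_strictAncs_of g n p n hp hr)

def ankSet (g : PySem.Dict Int (List Int)) (n : Int) : PySem.Set Int :=
  ancClosure g (PySem.Set.add PySem.Set.empty n)

def rnk (g : PySem.Dict Int (List Int)) (n : Int) : Nat := (ankSet g n).length

theorem mem_ankSet (g : PySem.Dict Int (List Int)) (n y : Int) :
    y ∈ ankSet g n ↔ Relation.ReflTransGen (fun a b => b ∈ findParents g a) n y := by
  unfold ankSet
  rw [mem_ancClosure]
  · constructor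
    · rintro ⟨s, hs, hr⟩
      have : s = n := by simpa [PySem.Set.add, PySem.Set.empty] using hs
      rwa [this] at hr
    · intro hr; exact ⟨n, by simp [PySem.Set.add, PySem.Set.empty], hr⟩
  · simp [PySem.Set.add, PySem.Set.empty]

theorem nodup_ankSet (g : PySem.Dict Int (List Int)) (n : Int) : (ankSet g n).Nodup := by
  unfold ankSet ancClosure
  exact nodup_satLoop _ _ _ (by simp [PySem.Set.add, PySem.Set.empty])

theorem rnk_pos (g : PySem.Dict Int (List Int)) (n : Int) : 1 ≤ rnk g n := by
  have : n ∈ ankSet g n := (mem_ankSet g n n).2 Relation.ReflTransGen.refl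
  have := List.length_pos_of_mem this
  unfold rnk; omega

theorem rnk_lt (g : PySem.Dict Int (List Int)) (n p : Int)
    (hnp : ¬ Relation.ReflTransGen (fun a b => b ∈ findParents g a) p n)
    (hp : p ∈ findParents g n) : rnk g p < rnk g n := by
  have hsub : (ankSet g p).toFinset ⊆ (ankSet g n).toFinset := by
    intro y hy
    rw [List.mem_toFinset] at hy ⊢
    rw [mem_ankSet] at hy ⊢
    exact Relation.ReflTransGen.head hp hy
  have hn1 : n ∈ (ankSet g n).toFinset := by
    rw [List.mem_toFinset, mem_ankSet]
  have hn2 : n ∉ (ankSet g p).toFinset := by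
    rw [List.mem_toFinset, mem_ankSet]
    exact hnp
  have hcard := Finset.card_lt_card (Finset.ssubset_iff_of_subset hsub |>.2 ⟨n, hn1, hn2⟩)
  unfold rnk
  rwa [List.toFinset_card_of_nodup (nodup_ankSet g p),
       List.toFinset_card_of_nodup (nodup_ankSet g n)] at hcard

theorem rnk_le (g : PySem.Dict Int (List Int)) (n : Int) : rnk g n ≤ g.keys.length + 1 := by
  have hsub : (ankSet g n).toFinset ⊆ (n :: g.keys).toFinset := by
    intro y hy
    rw [List.mem_toFinset] at hy
    rw [List.mem_toFinset, List.mem_cons]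
    rw [mem_ankSet] at hy
    rcases hy.cases_tail with rfl | ⟨c, _, hc⟩
    · exact Or.inl rfl
    · exact Or.inr (findParents_subset_keys g c y hc)
  have := Finset.card_le_card hsub
  have h2 := List.toFinset_card_le (n :: g.keys)
  rw [List.toFinset_card_of_nodup (nodup_ankSet g n)] at this
  simp only [List.length_cons] at h2
  unfold rnk; omega

def muGob (g : PySem.Dict Int (List Int)) (stack : List Int) : Nat :=
  (stack.map (fun s => (g.keys.length + 1) ^ rnk g s)).sum

theorem sum_pow_parents_lt (g : PySem.Dict Int (List Int)) (node : Int)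
    (hgood : GoodFrom g node) :
    ((findParents g node).map (fun p => (g.keys.length + 1) ^ rnk g p)).sum
      < (g.keys.length + 1) ^ rnk g node := by
  set K := g.keys.length with hK
  have hbound : ∀ x ∈ (findParents g node).map (fun p => (K + 1) ^ rnk g p),
      x ≤ (K + 1) ^ (rnk g node - 1) := by
    intro x hx
    rcases List.mem_map.1 hx with ⟨p, hp, rfl⟩
    have hnp := hgood node Relation.ReflTransGen.refl p hp
    exact Nat.pow_le_pow_right (by omega) (by have := rnk_lt g node p hnp hp; omega)
  have hsum := List.sum_le_card_nsmul _ _ hbound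
  have hlen : ((findParents g node).map (fun p => (K + 1) ^ rnk g p)).length ≤ K := by
    rw [List.length_map]; exact length_findParents_le g node
  have hpow : (K + 1) ^ rnk g node = (K + 1) * (K + 1) ^ (rnk g node - 1) := by
    have h1 := rnk_pos g node
    calc (K + 1) ^ rnk g node = (K + 1) ^ (1 + (rnk g node - 1)) := by congr 1; omega
    _ = (K + 1) * (K + 1) ^ (rnk g node - 1) := by rw [pow_add, pow_one]
  have hfin : ((findParents g node).map (fun p => (K + 1) ^ rnk g p)).length • ((K + 1) ^ (rnk g node - 1))
      ≤ K * (K + 1) ^ (rnk g node - 1) := by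
    rw [smul_eq_mul]
    exact Nat.mul_le_mul_right _ hlen
  have hpos : 0 < (K + 1) ^ (rnk g node - 1) := Nat.pow_pos (by omega)
  calc ((findParents g node).map (fun p => (K + 1) ^ rnk g p)).sum
      ≤ K * (K + 1) ^ (rnk g node - 1) := le_trans hsum hfin
    _ < (K + 1) * (K + 1) ^ (rnk g node - 1) := by
        exact Nat.mul_lt_mul_of_lt_of_le (by omega) le_rfl hpos
    _ = (K + 1) ^ rnk g node := hpow.symm

theorem gob_char (g : PySem.Dict Int (List Int)) :
    ∀ (f : Nat) (stack : List Int) (anc : PySem.Set Int), (∀ s ∈ stack, GoodFrom g s) →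
      muGob g stack < f → ∀ x,
      (x ∈ gobLoop g f stack anc ↔ x ∈ anc ∨ ∃ s ∈ stack, ∃ y,
        Relation.ReflTransGen (fun a b => b ∈ findParents g a) s y ∧ x ∈ findParents g y) := by
  intro f
  induction f with
  | zero => intro stack anc _ h; omega
  | succ f ih =>
    intro stack anc hgd hmu x
    rcases List.eq_nil_or_concat stack with rfl | ⟨L, node, rfl⟩
    · simp [gobLoop]
    · rw [List.concat_eq_append] at *
      have hpop : (L ++ [node]).getLast? = some node := by simp
      have hdrop : (L ++ [node]).dropLast = L := by simp
      have hstep : gobLoop g (f+1) (L ++ [node]) anc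
          = gobLoop g f (L ++ findParents g node) ((findParents g node).foldl PySem.Set.add anc) := by
        simp only [gobLoop, hpop, hdrop]
      rw [hstep]
      have hgnode : GoodFrom g node := hgd node (List.mem_append_right _ (by simp))
      have hgd' : ∀ s ∈ L ++ findParents g node, GoodFrom g s := by
        intro s hs
        rcases List.mem_append.1 hs with hs | hs
        · exact hgd s (List.mem_append_left _ hs)
        · exact GoodFrom_parent g node s hgnode hs
      have hmu' : muGob g (L ++ findParents g node) < f := by
        have h1 : muGob g (L ++ [node]) = muGob g L + (g.keys.length + 1) ^ rnk g node := by
          unfold muGob; simp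
        have h2 : muGob g (L ++ findParents g node)
            = muGob g L + ((findParents g node).map (fun p => (g.keys.length + 1) ^ rnk g p)).sum := by
          unfold muGob; simp
        have := sum_pow_parents_lt g node hgnode
        omega
      rw [ih _ _ hgd' hmu' x, mem_foldl_setAdd]
      constructor
      · rintro ((h | h) | ⟨s, hs, y, hr, hx⟩)
        · exact Or.inl h
        · exact Or.inr ⟨node, by simp, node, Relation.ReflTransGen.refl, h⟩
        · rcases List.mem_append.1 hs with hsL | hsP
          · exact Or.inr ⟨s, by simp [hsL], y, hr, hx⟩
          · exact Or.inr ⟨node, by simp, y,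
              Relation.ReflTransGen.head hsP hr, hx⟩
      · rintro (h | ⟨s, hs, y, hr, hx⟩)
        · exact Or.inl (Or.inl h)
        · rcases List.mem_append.1 hs with hsL | hsN
          · exact Or.inr ⟨s, List.mem_append_left _ hsL, y, hr, hx⟩
          · have : s = node := by simpa using hsN
            subst this
            rcases hr.cases_head with rfl | ⟨c, hc, hr'⟩
            · exact Or.inl (Or.inr hx)
            · exact Or.inr ⟨c, List.mem_append_right _ hc, y, hr', hx⟩

theorem mem_getObsAnc (g : PySem.Dict Int (List Int)) (obs : List Int)
    (hgood : ∀ o ∈ obs, GoodFrom g o) (x : Int) :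
    x ∈ getObsAnc g obs ↔ ∃ o ∈ obs, ∃ y,
      Relation.ReflTransGen (fun a b => b ∈ findParents g a) o y ∧ x ∈ findParents g y := by
  unfold getObsAnc
  rw [PySem.List.foldl_append_singleton, List.nil_append]
  have hmu : muGob g obs < obs.length * (g.keys.length + 1) ^ (g.keys.length + 1) + 1 := by
    have hbound : ∀ t ∈ obs.map (fun s => (g.keys.length + 1) ^ rnk g s),
        t ≤ (g.keys.length + 1) ^ (g.keys.length + 1) := by
      intro t ht
      rcases List.mem_map.1 ht with ⟨o, _, rfl⟩
      exact Nat.pow_le_pow_right (by omega) (rnk_le g o)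
    have := List.sum_le_card_nsmul _ _ hbound
    rw [List.length_map, smul_eq_mul] at this
    unfold muGob
    omega
  rw [gob_char g _ _ _ hgood hmu x]
  simp [PySem.Set.empty]

theorem mem_obs_or_anc (g : PySem.Dict Int (List Int)) (obs : List Int)
    (hgood : ∀ o ∈ obs, GoodFrom g o) (x : Int) :
    (x ∈ obs ∨ x ∈ getObsAnc g obs) ↔ ∃ o ∈ obs,
      Relation.ReflTransGen (fun a b => b ∈ findParents g a) o x := by
  rw [mem_getObsAnc g obs hgood]
  constructor
  · rintro (h | ⟨o, ho, y, hr, hx⟩)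
    · exact ⟨x, h, Relation.ReflTransGen.refl⟩
    · exact ⟨o, ho, hr.tail hx⟩
  · rintro ⟨o, ho, hr⟩
    rcases hr.cases_tail with rfl | ⟨c, hc, hx⟩
    · exact Or.inl ho
    · exact Or.inr ⟨o, ho, c, hc, hx⟩


-- ---------- B-side: the parent index and the saturations ----------

theorem buildParents_eq (g : PySem.Dict Int (List Int)) :
    buildParents g = (g.items.flatMap (fun kv => kv.2.map (fun c => (c, kv.1)))).foldl
      (fun d p => PySem.Dict.modify d p.1 [] (· ++ [p.2])) PySem.Dict.empty := by
  unfold buildParents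
  generalize (PySem.Dict.empty : PySem.Dict Int (List Int)) = e
  induction g.items generalizing e with
  | nil => rfl
  | cons kv L ih =>
    simp only [List.foldl_cons, List.flatMap_cons, List.foldl_append, ← ih]
    congr 1
    rw [List.foldl_map]

theorem mem_parB (g : PySem.Dict Int (List Int)) (n x : Int) :
    x ∈ PySem.Dict.getD (buildParents g) n [] ↔ x ∈ findParents g n := by
  rw [buildParents_eq, PySem.Dict.getD_foldl_modify_append, mem_findParents]
  simp only [PySem.Dict.getD_empty, List.nil_append, List.mem_map, List.mem_filter,
    List.mem_flatMap]
  constructor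
  · rintro ⟨p, ⟨⟨kv, hkv, ⟨c, hc, rfl⟩⟩, hp⟩, rfl⟩
    simp only [beq_iff_eq] at hp
    exact ⟨kv, hkv, rfl, by rwa [hp] at hc⟩
  · rintro ⟨kv, hkv, rfl, hn⟩
    exact ⟨(n, kv.1), ⟨⟨kv, hkv, ⟨n, hn, rfl⟩⟩, by simp⟩, rfl⟩

def ancB (g : PySem.Dict Int (List Int)) (obs : List Int) : PySem.Set Int :=
  satLoop (fun n => PySem.Dict.getD (buildParents g) n []) (g.keys.length + 1)
    (PySem.Set.ofList obs)

theorem parB_rel_eq (g : PySem.Dict Int (List Int)) :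
    (fun a b => b ∈ PySem.Dict.getD (buildParents g) a []) = (fun a b => b ∈ findParents g a) := by
  funext a b; exact propext (mem_parB g a b)

theorem mem_ancB (g : PySem.Dict Int (List Int)) (obs : List Int)
    (hgood : ∀ o ∈ obs, GoodFrom g o) (y : Int) :
    y ∈ ancB g obs ↔ (y ∈ obs ∨ y ∈ getObsAnc g obs) := by
  unfold ancB
  rw [satLoop_char (fun n => PySem.Dict.getD (buildParents g) n []) g.keys
    (fun n z hz => findParents_subset_keys g n z ((mem_parB g n z).1 hz)) _ _
    (PySem.Set.nodup_ofList _) (Nat.lt_succ_of_le (List.length_filter_le _ _)) y]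
  rw [parB_rel_eq, mem_obs_or_anc g obs hgood y]
  constructor
  · rintro ⟨s, hs, hr⟩; exact ⟨s, (PySem.Set.mem_ofList _ _).1 hs, hr⟩
  · rintro ⟨s, hs, hr⟩; exact ⟨s, (PySem.Set.mem_ofList _ _).2 hs, hr⟩

-- the canonical Bayes-ball successor list, as A pushes it
def MA (g : PySem.Dict Int (List Int)) (obs obsAnc : List Int) (nd : Int × Bool) :
    List (Int × Bool) :=
  if nd.2 = true ∧ nd.1 ∉ obs then
    (findParents g nd.1).map (fun p => (p, true)) ++ (PySem.Dict.getD g nd.1 []).map (fun c => (c, false))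
  else if nd.2 = false then
    (if nd.1 ∉ obs then (PySem.Dict.getD g nd.1 []).map (fun c => (c, false)) else []) ++
    (if nd.1 ∈ obs ∨ nd.1 ∈ obsAnc then (findParents g nd.1).map (fun p => (p, true)) else [])
  else []

-- B's nxt as a named function
def nxtB (g : PySem.Dict Int (List Int)) (obs : List Int) (nd : Int × Bool) :
    List (Int × Bool) :=
  if nd.2 = true ∧ nd.1 ∉ PySem.Set.ofList obs then
    (PySem.Dict.getD (buildParents g) nd.1 []).map (fun p => (p, true)) ++
      (PySem.Dict.getD g nd.1 []).map (fun c => (c, false))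
  else if nd.2 = false then
    (if nd.1 ∉ PySem.Set.ofList obs then (PySem.Dict.getD g nd.1 []).map (fun c => (c, false)) else []) ++
    (if nd.1 ∈ ancB g obs then (PySem.Dict.getD (buildParents g) nd.1 []).map (fun p => (p, true)) else [])
  else []

def reachedB (g : PySem.Dict Int (List Int)) (start : Int) (obs : List Int) :
    PySem.Set (Int × Bool) :=
  satLoop (nxtB g obs) (g.keys.length + g.values.flatten.length + 2)
    (PySem.Set.add PySem.Set.empty (start, true))

theorem alt_eq (graph : List (Int × List Int)) (start end_ : Int) (obs : List Int) :
    is_dsep_alt graph start end_ obs =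
      (if end_ ∈ PySem.Set.ofList obs then true
       else decide ((end_, true) ∉ reachedB (PySem.Dict.ofList graph) start obs ∧
                    (end_, false) ∉ reachedB (PySem.Dict.ofList graph) start obs)) := rfl

theorem mem_nxtB_iff_MA (g : PySem.Dict Int (List Int)) (obs : List Int)
    (hgood : ∀ o ∈ obs, GoodFrom g o) (nd u : Int × Bool) : u ∈ nxtB g obs nd ↔ u ∈ MA g obs (getObsAnc g obs) nd := by
  obtain ⟨n, d⟩ := nd
  have h1 : (n ∈ PySem.Set.ofList obs) ↔ n ∈ obs := PySem.Set.mem_ofList _ _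
  have h2 : (n ∈ ancB g obs) ↔ (n ∈ obs ∨ n ∈ getObsAnc g obs) := mem_ancB g obs hgood n
  unfold nxtB MA
  cases d
  · by_cases hobs : n ∈ obs
    · simp [hobs, h2, mem_parB]
    · simp [hobs, h1, h2, mem_parB]
  · by_cases hobs : n ∈ obs
    · simp [hobs, h1]
    · simp [hobs, h1, mem_parB]

def UpairsD (g : PySem.Dict Int (List Int)) : List (Int × Bool) :=
  g.keys.map (fun p => (p, true)) ++ g.values.flatten.map (fun c => (c, false))

theorem MA_sub_Upairs (g : PySem.Dict Int (List Int)) (obs obsAnc : List Int) (nd u : Int × Bool)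
    (hu : u ∈ MA g obs obsAnc nd) : u ∈ UpairsD g := by
  unfold MA at hu
  unfold UpairsD
  split at hu
  · rcases List.mem_append.1 hu with h | h
    · rcases List.mem_map.1 h with ⟨p, hp, rfl⟩
      exact List.mem_append_left _ (List.mem_map.2 ⟨p, findParents_subset_keys g nd.1 p hp, rfl⟩)
    · rcases List.mem_map.1 h with ⟨c, hc, rfl⟩
      exact List.mem_append_right _ (List.mem_map.2 ⟨c, mem_getD_flatten g nd.1 c hc, rfl⟩)
  · split at hu
    · rcases List.mem_append.1 hu with h | h
      · split at h
        · rcases List.mem_map.1 h with ⟨c, hc, rfl⟩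
          exact List.mem_append_right _ (List.mem_map.2 ⟨c, mem_getD_flatten g nd.1 c hc, rfl⟩)
        · cases h
      · split at h
        · rcases List.mem_map.1 h with ⟨p, hp, rfl⟩
          exact List.mem_append_left _ (List.mem_map.2 ⟨p, findParents_subset_keys g nd.1 p hp, rfl⟩)
        · cases h
    · cases hu

theorem getD_length_le (g : PySem.Dict Int (List Int)) (n : Int) :
    (PySem.Dict.getD g n []).length ≤ g.values.flatten.length := by
  rw [PySem.Dict.getD_eq_get?_getD]
  cases hg : PySem.Dict.get? g n with
  | none => simp
  | some v =>
    have hv : v ∈ g.values := by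
      have := PySem.Dict.mem_items_of_get?_eq_some _ hg
      simp only [PySem.Dict.values]
      exact List.mem_map.2 ⟨(n, v), this, rfl⟩
    simp only [Option.getD_some]
    calc v.length ≤ (g.values.map List.length).sum :=
          List.single_le_sum (by simp) _ (List.mem_map.2 ⟨v, hv, rfl⟩)
      _ = g.values.flatten.length := by rw [List.length_flatten]

theorem MA_length_le (g : PySem.Dict Int (List Int)) (obs obsAnc : List Int) (nd : Int × Bool) :
    (MA g obs obsAnc nd).length ≤ g.keys.length + g.values.flatten.length := by
  have hp := length_findParents_le g nd.1
  have hc := getD_length_le g nd.1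
  unfold MA
  split
  · simp only [List.length_append, List.length_map]; omega
  · split
    · simp only [List.length_append]
      have h1 : (if nd.1 ∉ obs then (PySem.Dict.getD g nd.1 []).map (fun c => (c, false)) else []).length
          ≤ g.values.flatten.length := by
        split
        · simpa using hc
        · simp
      have h2 : (if nd.1 ∈ obs ∨ nd.1 ∈ obsAnc then (findParents g nd.1).map (fun p => (p, true)) else []).length
          ≤ g.keys.length := by
        split
        · simpa using hp
        · simp
      omega
    · simp

theorem mem_reachedB (g : PySem.Dict Int (List Int)) (start : Int) (obs : List Int)
    (hgood : ∀ o ∈ obs, GoodFrom g o) (y : Int × Bool) :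
    y ∈ reachedB g start obs ↔
      Relation.ReflTransGen (fun a b => b ∈ MA g obs (getObsAnc g obs) a) (start, true) y := by
  unfold reachedB
  rw [satLoop_char (nxtB g obs) (UpairsD g)
    (fun n z hz => MA_sub_Upairs g obs (getObsAnc g obs) n z ((mem_nxtB_iff_MA g obs hgood n z).1 hz))
    _ _ (by simp [PySem.Set.add, PySem.Set.empty])
    (by
      have h2 : (UpairsD g).length = g.keys.length + g.values.flatten.length := by
        unfold UpairsD; simp [List.length_flatten, Function.comp_def]
      exact lt_of_le_of_lt (List.length_filter_le _ _) (by omega)) y]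
  have hrel : (fun (a b : Int × Bool) => b ∈ nxtB g obs a)
      = (fun a b => b ∈ MA g obs (getObsAnc g obs) a) := by
    funext a b; exact propext (mem_nxtB_iff_MA g obs hgood a b)
  rw [hrel]
  constructor
  · rintro ⟨s, hs, hr⟩
    have : s = (start, true) := by simpa [PySem.Set.add, PySem.Set.empty] using hs
    rwa [this] at hr
  · intro hr; exact ⟨(start, true), by simp [PySem.Set.add, PySem.Set.empty], hr⟩

theorem reachedB_closed (g : PySem.Dict Int (List Int)) (start : Int) (obs : List Int)
    (hgood : ∀ o ∈ obs, GoodFrom g o) :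
    ∀ a ∈ reachedB g start obs, ∀ b ∈ MA g obs (getObsAnc g obs) a,
      b ∈ reachedB g start obs := by
  intro a ha b hb
  rw [mem_reachedB g start obs hgood] at ha ⊢
  exact ha.tail hb

theorem init_mem_reachedB (g : PySem.Dict Int (List Int)) (start : Int) (obs : List Int) :
    (start, true) ∈ reachedB g start obs :=
  mem_satLoop_of_mem _ _ _ _ (by simp [PySem.Set.add, PySem.Set.empty])

-- ---------- the main loop ----------

theorem mainLoop_concat (g : PySem.Dict Int (List Int)) (end_ : Int) (obs obsAnc : List Int)
    (f : Nat) (L : List (Int × Bool)) (nd : Int × Bool) (visited : PySem.Set (Int × Bool)) :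
    mainLoop g end_ obs obsAnc (f+1) (L ++ [nd]) visited =
      if nd ∈ visited then mainLoop g end_ obs obsAnc f L visited
      else if nd.1 ∉ obs ∧ nd.1 = end_ then false
      else mainLoop g end_ obs obsAnc f (L ++ MA g obs obsAnc nd) (PySem.Set.add visited nd) := by
  have hpop : (L ++ [nd]).getLast? = some nd := by simp
  have hdrop : (L ++ [nd]).dropLast = L := by simp
  by_cases hv : nd ∈ visited
  · rw [if_pos hv]; simp only [mainLoop, hpop, hdrop]; rw [if_pos hv]
  · rw [if_neg hv]; simp only [mainLoop, hpop, hdrop]; rw [if_neg hv]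
    by_cases hact : nd.1 ∉ obs ∧ nd.1 = end_
    · rw [if_pos hact, if_pos hact]
    · rw [if_neg hact, if_neg hact]
      unfold MA
      by_cases hup : nd.2 = true ∧ nd.1 ∉ obs
      · rw [if_pos hup, if_pos hup, List.append_assoc]
      · rw [if_neg hup, if_neg hup]
        by_cases hdn : nd.2 = false
        · rw [if_pos hdn, if_pos hdn, List.append_assoc]
        · rw [if_neg hdn, if_neg hdn, List.append_nil]

theorem mainLoop_nil (g : PySem.Dict Int (List Int)) (end_ : Int) (obs obsAnc : List Int)
    (f : Nat) (visited : PySem.Set (Int × Bool)) :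
    mainLoop g end_ obs obsAnc (f+1) [] visited = true := by
  simp [mainLoop]

theorem falseDir (g : PySem.Dict Int (List Int)) (end_ : Int) (obs obsAnc : List Int)
    (C : List (Int × Bool)) (hclosed : ∀ s ∈ C, ∀ u ∈ MA g obs obsAnc s, u ∈ C) :
    ∀ (f : Nat) (via : List (Int × Bool)) (visited : PySem.Set (Int × Bool)),
      (∀ s ∈ via, s ∈ C) → mainLoop g end_ obs obsAnc f via visited = false →
      ∃ s ∈ C, s.1 ∉ obs ∧ s.1 = end_ := by
  intro f
  induction f with
  | zero => intro via visited _ h; cases h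
  | succ f ih =>
    intro via visited hvia h
    rcases List.eq_nil_or_concat via with rfl | ⟨L, nd, rfl⟩
    · rw [mainLoop_nil] at h; cases h
    · rw [List.concat_eq_append] at *
      rw [mainLoop_concat] at h
      have hndC : nd ∈ C := hvia nd (List.mem_append_right _ (by simp))
      have hL : ∀ s ∈ L, s ∈ C := fun s hs => hvia s (List.mem_append_left _ hs)
      split at h
      · exact ih L visited hL h
      · split at h
        · next hact => exact ⟨nd, hndC, hact⟩
        · refine ih _ _ ?_ h
          intro s hs
          rcases List.mem_append.1 hs with hs | hs
          · exact hL s hs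
          · exact hclosed nd hndC s hs

def muMain (g : PySem.Dict Int (List Int)) (start : Int) (via : List (Int × Bool))
    (visited : PySem.Set (Int × Bool)) : Nat :=
  (g.keys.length + g.values.flatten.length + 1) *
    (((start, true) :: UpairsD g).filter (fun a => decide (a ∉ visited))).length + via.length

theorem trueDir (g : PySem.Dict Int (List Int)) (end_ : Int) (obs obsAnc : List Int) (start : Int) :
    ∀ (f : Nat) (via : List (Int × Bool)) (visited : PySem.Set (Int × Bool)),
      muMain g start via visited < f → (∀ s ∈ via, s ∈ (start, true) :: UpairsD g) →
      mainLoop g end_ obs obsAnc f via visited = true →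
      ∃ V : List (Int × Bool), (∀ s ∈ visited, s ∈ V) ∧ (∀ s ∈ via, s ∈ V) ∧
        ∀ t ∈ V, t ∉ visited → (¬(t.1 ∉ obs ∧ t.1 = end_) ∧ ∀ u ∈ MA g obs obsAnc t, u ∈ V) := by
  intro f
  induction f with
  | zero => intro via visited h; omega
  | succ f ih =>
    intro via visited hmu hvia h
    rcases List.eq_nil_or_concat via with rfl | ⟨L, nd, rfl⟩
    · exact ⟨visited, fun s hs => hs, by simp, fun t ht htv => absurd ht htv⟩
    · rw [List.concat_eq_append] at *
      rw [mainLoop_concat] at h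
      have hndA : nd ∈ (start, true) :: UpairsD g := hvia nd (List.mem_append_right _ (by simp))
      have hL : ∀ s ∈ L, s ∈ (start, true) :: UpairsD g := fun s hs => hvia s (List.mem_append_left _ hs)
      have hlen : (L ++ [nd]).length = L.length + 1 := by simp
      split at h
      · next hv =>
        rcases ih L visited (by unfold muMain at hmu ⊢; omega) hL h with ⟨V, h1, h2, h3⟩
        refine ⟨V, h1, ?_, h3⟩
        intro s hs
        rcases List.mem_append.1 hs with hs | hs
        · exact h2 s hs
        · have : s = nd := by simpa using hs
          exact this ▸ h1 nd hv
      · split at h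
        · cases h
        · next hv hact =>
          have hmu' : muMain g start (L ++ MA g obs obsAnc nd) (PySem.Set.add visited nd) < f := by
            have hdrop := length_filter_lt ((start, true) :: UpairsD g)
              (fun a => decide (a ∉ visited)) (fun a => decide (a ∉ PySem.Set.add visited nd))
              (by intro u hu; simp only [decide_eq_true_eq, PySem.Set.mem_add] at hu ⊢; tauto)
              nd hndA (by simpa using hv) (by simp [PySem.Set.mem_add])
            have hMAlen := MA_length_le g obs obsAnc nd
            unfold muMain at hmu ⊢
            have hlen2 : (L ++ MA g obs obsAnc nd).length = L.length + (MA g obs obsAnc nd).length := by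
              simp
            set N := g.keys.length + g.values.flatten.length with hN
            set F1 := (((start, true) :: UpairsD g).filter (fun a => decide (a ∉ visited))).length
            set F2 := (((start, true) :: UpairsD g).filter (fun a => decide (a ∉ PySem.Set.add visited nd))).length
            rw [hlen2]
            rw [hlen] at hmu
            nlinarith [hmu, hdrop, hMAlen]
          rcases ih _ _ hmu' (by
            intro s hs
            rcases List.mem_append.1 hs with hs | hs
            · exact hL s hs
            · exact List.mem_cons_of_mem _ (MA_sub_Upairs g obs obsAnc nd s hs)) h with ⟨V, h1, h2, h3⟩
          have hndV : nd ∈ V := h1 nd (by simp [PySem.Set.mem_add])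
          refine ⟨V, fun s hs => h1 s (by simp [PySem.Set.mem_add, hs]), ?_, ?_⟩
          · intro s hs
            rcases List.mem_append.1 hs with hs | hs
            · exact h2 s (List.mem_append_left _ hs)
            · have : s = nd := by simpa using hs
              exact this ▸ hndV
          · intro t htV htvis
            by_cases htnd : t = nd
            · subst htnd
              exact ⟨hact, fun u hu => h2 u (List.mem_append_right _ hu)⟩
            · exact h3 t htV (by simp [PySem.Set.mem_add, htvis, htnd])

theorem length_filter_empty (start : Int) (g : PySem.Dict Int (List Int)) :
    (((start, true) :: UpairsD g).filter (fun a => decide (a ∉ (PySem.Set.empty : PySem.Set (Int × Bool))))).length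
      = g.keys.length + g.values.flatten.length + 1 := by
  have h : ((start, true) :: UpairsD g).filter (fun a => decide (a ∉ (PySem.Set.empty : PySem.Set (Int × Bool))))
      = (start, true) :: UpairsD g := List.filter_eq_self.2 (by intro a _; simp [PySem.Set.empty])
  rw [h]
  simp [UpairsD, List.length_flatten, Function.comp_def]

-- ===== VERDICT (by name: the statement is the Claim_ definition above) =====
theorem is_dsep_spec : Claim_equal_is_dsep := by
  intro graph start end_ obs _hdom hpre
  unfold Spec_is_dsep
  obtain ⟨hpreanc, -⟩ := hpre
  have hgood : ∀ o ∈ obs, GoodFrom (PySem.Dict.ofList graph) o := good_of_pre _ obs hpreanc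
  have ha : is_dsep graph start end_ obs
      = mainLoop (PySem.Dict.ofList graph) end_ obs (getObsAnc (PySem.Dict.ofList graph) obs)
          (((PySem.Dict.ofList graph).keys.length + (PySem.Dict.ofList graph).values.flatten.length + 1) *
             ((PySem.Dict.ofList graph).keys.length + (PySem.Dict.ofList graph).values.flatten.length + 1) + 2)
          [(start, true)] PySem.Set.empty := rfl
  rw [alt_eq, ha]
  by_cases hend : end_ ∈ PySem.Set.ofList obs
  · rw [if_pos hend]
    cases hA : mainLoop (PySem.Dict.ofList graph) end_ obs (getObsAnc (PySem.Dict.ofList graph) obs)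
        (((PySem.Dict.ofList graph).keys.length + (PySem.Dict.ofList graph).values.flatten.length + 1) *
           ((PySem.Dict.ofList graph).keys.length + (PySem.Dict.ofList graph).values.flatten.length + 1) + 2)
        [(start, true)] PySem.Set.empty with
    | true => rfl
    | false =>
      exfalso
      rcases falseDir (PySem.Dict.ofList graph) end_ obs (getObsAnc (PySem.Dict.ofList graph) obs)
          (reachedB (PySem.Dict.ofList graph) start obs)
          (reachedB_closed (PySem.Dict.ofList graph) start obs hgood) _ _ _
          (by intro s hs; have : s = (start, true) := by simpa using hs
              exact this ▸ init_mem_reachedB (PySem.Dict.ofList graph) start obs) hA with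
        ⟨s, _, hno, hseq⟩
      exact hno (hseq ▸ ((PySem.Set.mem_ofList _ _).1 hend))
  · rw [if_neg hend]
    have hendobs : end_ ∉ obs := fun h => hend ((PySem.Set.mem_ofList _ _).2 h)
    by_cases hr : (end_, true) ∈ reachedB (PySem.Dict.ofList graph) start obs ∨
        (end_, false) ∈ reachedB (PySem.Dict.ofList graph) start obs
    · have hrhs : decide ((end_, true) ∉ reachedB (PySem.Dict.ofList graph) start obs ∧
          (end_, false) ∉ reachedB (PySem.Dict.ofList graph) start obs) = false := by
        rcases hr with h | h <;> simp [h]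
      rw [hrhs]
      cases hA : mainLoop (PySem.Dict.ofList graph) end_ obs (getObsAnc (PySem.Dict.ofList graph) obs)
          (((PySem.Dict.ofList graph).keys.length + (PySem.Dict.ofList graph).values.flatten.length + 1) *
             ((PySem.Dict.ofList graph).keys.length + (PySem.Dict.ofList graph).values.flatten.length + 1) + 2)
          [(start, true)] PySem.Set.empty with
      | false => rfl
      | true =>
        exfalso
        rcases trueDir (PySem.Dict.ofList graph) end_ obs (getObsAnc (PySem.Dict.ofList graph) obs) start
            _ _ _
            (by
              unfold muMain
              rw [length_filter_empty]
              simp only [List.length_singleton]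
              nlinarith [Nat.zero_le ((PySem.Dict.ofList graph).keys.length + (PySem.Dict.ofList graph).values.flatten.length)])
            (by intro s hs; have : s = (start, true) := by simpa using hs
                exact this ▸ List.mem_cons_self)
            hA with ⟨V, _, h2, h3⟩
        have hCV : ∀ y ∈ reachedB (PySem.Dict.ofList graph) start obs, y ∈ V := by
          intro y hy
          exact closed_reach (MA (PySem.Dict.ofList graph) obs (getObsAnc (PySem.Dict.ofList graph) obs)) V
            (fun a ha b hb => (h3 a ha (by simp [PySem.Set.empty])).2 b hb)
            (start, true) y (h2 (start, true) (by simp))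
            ((mem_reachedB (PySem.Dict.ofList graph) start obs hgood y).1 hy)
        rcases hr with h | h
        · exact (h3 _ (hCV _ h) (by simp [PySem.Set.empty])).1 ⟨hendobs, rfl⟩
        · exact (h3 _ (hCV _ h) (by simp [PySem.Set.empty])).1 ⟨hendobs, rfl⟩
    · have hr1 : (end_, true) ∉ reachedB (PySem.Dict.ofList graph) start obs := fun h => hr (Or.inl h)
      have hr2 : (end_, false) ∉ reachedB (PySem.Dict.ofList graph) start obs := fun h => hr (Or.inr h)
      have hrhs : decide ((end_, true) ∉ reachedB (PySem.Dict.ofList graph) start obs ∧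
          (end_, false) ∉ reachedB (PySem.Dict.ofList graph) start obs) = true := by
        simp [hr1, hr2]
      rw [hrhs]
      cases hA : mainLoop (PySem.Dict.ofList graph) end_ obs (getObsAnc (PySem.Dict.ofList graph) obs)
          (((PySem.Dict.ofList graph).keys.length + (PySem.Dict.ofList graph).values.flatten.length + 1) *
             ((PySem.Dict.ofList graph).keys.length + (PySem.Dict.ofList graph).values.flatten.length + 1) + 2)
          [(start, true)] PySem.Set.empty with
      | true => rfl
      | false =>
        exfalso
        rcases falseDir (PySem.Dict.ofList graph) end_ obs (getObsAnc (PySem.Dict.ofList graph) obs)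
            (reachedB (PySem.Dict.ofList graph) start obs)
            (reachedB_closed (PySem.Dict.ofList graph) start obs hgood) _ _ _
            (by intro s hs; have : s = (start, true) := by simpa using hs
                exact this ▸ init_mem_reachedB (PySem.Dict.ofList graph) start obs) hA with
          ⟨s, hsC, hno, hseq⟩
        have hs' : s = (end_, s.2) := by
          apply Prod.ext
          · exact hseq
          · rfl
        cases hb : s.2 with
        | true => exact hr1 (by rw [hs', hb] at hsC; exact hsC)
        | false => exact hr2 (by rw [hs', hb] at hsC; exact hsC)
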